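-- pv_equiv track=rewrite | github.com/AlenAlic/DANCE | backend/skating.py | generate_placings
-- ===== SOURCE A (Python) =====
-- def generate_placings(results, counter=1):
--     unique_results = list(set([r for r in results if r != -1]))
--     unique_results.sort(reverse=True)
--     result_placing = {}
--     for i in set(results):
--         result_placing.update({i: results.count(i)})
--     result_map = {}
--     for i in unique_results:
--         if result_placing[i] == 1:
--             result_map.update({i: str(counter)})
--         else:
--             result_map.update({i: str(counter) + "-" + str(counter + result_placing[i] - 1)})
--         counter += result_placing[i]
--     return result_map
-- ===== SOURCE B (Python) =====
-- def generate_placings(results, counter=1):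
--     # For each distinct non-(-1) value v (descending), the placing start is
--     # counter plus v's rank in the descending-sorted results (= number of
--     # strictly greater non-(-1) results), and the width is v's frequency:
--     # no running counter, no frequency pre-pass.
--     ranked = sorted((r for r in results if r != -1), reverse=True)
--     result_map = {}
--     for v in sorted(set(ranked), reverse=True):
--         start = counter + ranked.index(v)
--         width = results.count(v)
--         result_map[v] = str(start) if width == 1 else f"{start}-{start + width - 1}"
--     return result_map
-- ===== Notes on version B (the rewrite author's own statement) =====
-- stated objective: alternative
-- what changed: Replaces A's frequency-dict pre-pass plus running-counter accumulation with an independent per-value computation: each placing start is counter plus the value's first index in a descending-sorted copy (= number of strictly greater non-(-1) results), in a single loop.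
import Mathlib
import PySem

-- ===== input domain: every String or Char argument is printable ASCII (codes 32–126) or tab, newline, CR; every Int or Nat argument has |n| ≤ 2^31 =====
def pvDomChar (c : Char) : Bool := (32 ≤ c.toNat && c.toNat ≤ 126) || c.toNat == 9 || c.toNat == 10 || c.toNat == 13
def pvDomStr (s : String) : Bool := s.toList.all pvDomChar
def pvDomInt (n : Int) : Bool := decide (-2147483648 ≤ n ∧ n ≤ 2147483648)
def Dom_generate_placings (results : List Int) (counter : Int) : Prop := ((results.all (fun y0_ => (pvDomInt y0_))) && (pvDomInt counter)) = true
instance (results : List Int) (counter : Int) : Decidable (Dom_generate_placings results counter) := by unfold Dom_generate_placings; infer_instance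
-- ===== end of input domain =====

-- B replaces A's frequency-dict pre-pass and running counter with an independent
-- per-value rank computation (start = counter + #greater non-(-1) results); alternative, not faster.

-- ===== PORT A =====
def generate_placings (results : List Int) (counter : Int) : List (Int × String) :=
  let unique_results :=
    PySem.List.sorted (PySem.Set.ofList (results.filter (fun r => decide (r ≠ -1)))) (fun x => x) true
  let result_placing : PySem.Dict Int Int :=
    (PySem.Set.ofList results).foldl (fun d i => d.insert i (results.count i : Int)) PySem.Dict.empty
  let final := unique_results.foldl
    (fun (st : PySem.Dict Int String × Int) i =>
      -- result_placing[i]: the key is always present (i ∈ results), so no KeyError; getD 0 is unreachable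
      let cnt := (result_placing.get? i).getD 0
      let m := if cnt = 1 then st.1.insert i (PySem.Int.toStr st.2)
               else st.1.insert i (PySem.Int.toStr st.2 ++ "-" ++ PySem.Int.toStr (st.2 + cnt - 1))
      (m, st.2 + cnt))
    (PySem.Dict.empty, counter)
  final.1.items

-- ===== PORT B =====
def generate_placings_alt (results : List Int) (counter : Int) : List (Int × String) :=
  let ranked := PySem.List.sorted (results.filter (fun r => decide (r ≠ -1))) (fun x => x) true
  let vals := PySem.List.sorted (PySem.Set.ofList ranked) (fun x => x) true
  let result_map := vals.foldl
    (fun (d : PySem.Dict Int String) v =>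
      -- ranked.index(v): v is always in ranked, so no ValueError; getD 0 is unreachable
      let start := counter + (((PySem.List.index? ranked v).getD 0 : Nat) : Int)
      let width := (results.count v : Int)
      d.insert v (if width = 1 then PySem.Int.toStr start
                  else PySem.Int.toStr start ++ "-" ++ PySem.Int.toStr (start + width - 1)))
    PySem.Dict.empty
  result_map.items

-- ===== PRECONDITION & SPEC =====
def Spec_generate_placings (results : List Int) (counter : Int) (out : List (Int × String)) : Prop := out = generate_placings_alt results counter
instance (results : List Int) (counter : Int) (out : List (Int × String)) : Decidable (Spec_generate_placings results counter out) := by unfold Spec_generate_placings; infer_instance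

-- ===== CLAIM (what is proved, stated in full; the proofs are below) =====
def Claim_equal_generate_placings : Prop := ∀ (results : List Int) (counter : Int), Dom_generate_placings results counter → Spec_generate_placings results counter (generate_placings results counter)

-- ===== LEMMAS AND PROOFS =====

-- lookup in the dict built by inserting (i, g i) for every i of a list
theorem get?_foldl_insert_fn (l : List Int) (g : Int → Int) (d : PySem.Dict Int Int) (v : Int) :
    (l.foldl (fun d i => d.insert i (g i)) d).get? v
      = if v ∈ l then some (g v) else d.get? v := by
  induction l generalizing d with
  | nil => simp
  | cons i t ih =>
    simp only [List.foldl_cons, ih, List.mem_cons]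
    by_cases hvt : v ∈ t
    · simp [hvt]
    · by_cases hvi : v = i
      · subst hvi; simp [hvt, PySem.Dict.get?_insert_self]
      · simp [hvt, hvi, PySem.Dict.get?_insert_of_ne _ _ hvi]

theorem countP_split (results vs : List Int) (v : Int) (hv : v ≠ -1) (hvs : v ∉ vs) :
    results.countP (fun r => decide (r ≠ -1) && !(vs.contains r))
      = results.countP (fun r => decide (r ≠ -1) && !((v :: vs).contains r)) + results.count v := by
  induction results with
  | nil => simp
  | cons r t ih =>
    rw [List.countP_cons, List.countP_cons, List.count_cons, ih]
    split_ifs <;> simp_all <;> omega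

-- first index in a descending-sorted list = number of strictly greater elements
theorem index?_desc (f : List Int) (v : Int) (hp : f.Pairwise (· ≥ ·)) (hv : v ∈ f) :
    PySem.List.index? f v = some (f.countP (fun r => decide (r > v))) := by
  induction f with
  | nil => cases hv
  | cons a t ih =>
    obtain ⟨ha, hp'⟩ := List.pairwise_cons.mp hp
    by_cases hav : a = v
    · subst hav
      rw [PySem.List.index?_cons_self, List.countP_cons]
      have hz : t.countP (fun r => decide (r > a)) = 0 := by
        rw [List.countP_eq_zero]
        intro r hr
        have := ha r hr
        simp; omega
      simp [hz]
    · have hvt : v ∈ t := by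
        rcases List.mem_cons.mp hv with h | h
        · exact absurd h.symm hav
        · exact h
      have hgt : a > v := lt_of_le_of_ne (ha v hvt) (fun h => hav h.symm)
      rw [PySem.List.index?_cons_of_ne t hav, ih hp' hvt, List.countP_cons]
      simp [hgt]

-- main loop invariant: A's running-counter fold equals B's per-value fold
theorem fold_eq (results : List Int) (counter : Int) (vals : List Int)
    (hp : vals.Pairwise (· > ·))
    (hmem : ∀ v ∈ vals, v ∈ results ∧ v ≠ -1)
    (hdc : ∀ r ∈ results, r ≠ -1 → r ∉ vals → ∀ w ∈ vals, w < r)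
    (m : PySem.Dict Int String) (c : Int)
    (hc : c = counter + results.countP (fun r => decide (r ≠ -1) && !(vals.contains r))) :
    (vals.foldl
      (fun (st : PySem.Dict Int String × Int) i =>
        let cnt := (((PySem.Set.ofList results).foldl (fun d i => d.insert i (results.count i : Int)) PySem.Dict.empty).get? i).getD 0
        let m := if cnt = 1 then st.1.insert i (PySem.Int.toStr st.2)
                 else st.1.insert i (PySem.Int.toStr st.2 ++ "-" ++ PySem.Int.toStr (st.2 + cnt - 1))
        (m, st.2 + cnt)) (m, c)).1
    = vals.foldl
      (fun (d : PySem.Dict Int String) v =>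
        let start := counter + (((PySem.List.index? (PySem.List.sorted (results.filter (fun r => decide (r ≠ -1))) (fun x => x) true) v).getD 0 : Nat) : Int)
        let width := (results.count v : Int)
        d.insert v (if width = 1 then PySem.Int.toStr start
                    else PySem.Int.toStr start ++ "-" ++ PySem.Int.toStr (start + width - 1))) m := by
  induction vals generalizing m c with
  | nil => rfl
  | cons v vs ih =>
    obtain ⟨hvr, hvne⟩ := hmem v (List.mem_cons_self ..)
    have hvvs : v ∉ vs := by
      intro h
      exact absurd ((List.pairwise_cons.mp hp).1 v h) (lt_irrefl v)
    -- the dict lookup returns the count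
    have hlook : (((PySem.Set.ofList results).foldl (fun d i => d.insert i (results.count i : Int)) PySem.Dict.empty).get? v).getD 0 = (results.count v : Int) := by
      rw [get?_foldl_insert_fn]
      simp [PySem.Set.mem_ofList, hvr]
    -- B's start equals A's current counter
    have hstart : counter + (((PySem.List.index? (PySem.List.sorted (results.filter (fun r => decide (r ≠ -1))) (fun x => x) true) v).getD 0 : Nat) : Int) = c := by
      have hvf : v ∈ PySem.List.sorted (results.filter (fun r => decide (r ≠ -1))) (fun x => x) true := by
        rw [PySem.List.mem_sorted, List.mem_filter]
        exact ⟨hvr, by simp [hvne]⟩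
      have hpge : (PySem.List.sorted (results.filter (fun r => decide (r ≠ -1))) (fun x => x) true).Pairwise (· ≥ ·) :=
        (PySem.List.sorted_pairwise_rev (xs := results.filter (fun r => decide (r ≠ -1))) (key := fun x : Int => x)).imp (fun h => h)
      rw [index?_desc _ _ hpge hvf, Option.getD_some]
      have h1 : (PySem.List.sorted (results.filter (fun r => decide (r ≠ -1))) (fun x => x) true).countP (fun r => decide (r > v))
              = (results.filter (fun r => decide (r ≠ -1))).countP (fun r => decide (r > v)) :=
        (PySem.List.sorted_perm ..).countP_eq _
      have h2 : (results.filter (fun r => decide (r ≠ -1))).countP (fun r => decide (r > v))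
              = results.countP (fun r => decide (r ≠ -1) && !((v :: vs).contains r)) := by
        rw [List.countP_filter]
        apply List.countP_congr
        intro r hr
        by_cases h1' : r = -1
        · simp [h1']
        · by_cases h2' : r ∈ v :: vs
          · have hle : ¬ r > v := by
              rcases List.mem_cons.mp h2' with h | h
              · omega
              · have := (List.pairwise_cons.mp hp).1 r h; omega
            simp [h1', h2', hle]
          · have hgt : r > v := hdc r hr h1' h2' v (List.mem_cons_self ..)
            simp [h1', h2', hgt]
      rw [h1, h2, hc]
    simp only [List.foldl_cons]
    rw [hlook]
    have hbranch :
        (if (results.count v : Int) = 1 then m.insert v (PySem.Int.toStr c)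
         else m.insert v (PySem.Int.toStr c ++ "-" ++ PySem.Int.toStr (c + (results.count v : Int) - 1)))
      = m.insert v (if (results.count v : Int) = 1
          then PySem.Int.toStr (counter + (((PySem.List.index? (PySem.List.sorted (results.filter (fun r => decide (r ≠ -1))) (fun x => x) true) v).getD 0 : Nat) : Int))
          else PySem.Int.toStr (counter + (((PySem.List.index? (PySem.List.sorted (results.filter (fun r => decide (r ≠ -1))) (fun x => x) true) v).getD 0 : Nat) : Int)) ++ "-"
               ++ PySem.Int.toStr ((counter + (((PySem.List.index? (PySem.List.sorted (results.filter (fun r => decide (r ≠ -1))) (fun x => x) true) v).getD 0 : Nat) : Int)) + (results.count v : Int) - 1)) := by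
      rw [hstart]
      split_ifs <;> rfl
    rw [hbranch]
    apply ih
    · exact (List.pairwise_cons.mp hp).2
    · exact fun w hw => hmem w (List.mem_cons_of_mem _ hw)
    · intro r hr h1 h2 w hw
      by_cases hrv : r = v
      · subst hrv; exact (List.pairwise_cons.mp hp).1 w hw
      · have : r ∉ v :: vs := by
          intro h; rcases List.mem_cons.mp h with h | h
          · exact hrv h
          · exact h2 h
        exact hdc r hr h1 this w (List.mem_cons_of_mem _ hw)
    · rw [hc, countP_split results vs v hvne hvvs]; push_cast; ring

-- the sorted distinct list is strictly descending
theorem vals_pairwise (results : List Int) :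
    (PySem.List.sorted (PySem.Set.ofList (results.filter (fun r => decide (r ≠ -1)))) (fun x => x) true).Pairwise (· > ·) := by
  have h1 := PySem.List.sorted_pairwise_rev (xs := PySem.Set.ofList (results.filter (fun r => decide (r ≠ -1)))) (key := fun x : Int => x)
  have hnd : (PySem.List.sorted (PySem.Set.ofList (results.filter (fun r => decide (r ≠ -1)))) (fun x => x) true).Nodup :=
    (PySem.List.sorted_perm ..).nodup_iff.mpr (PySem.Set.nodup_ofList _)
  exact (h1.and hnd).imp (by rintro a b ⟨hle, hne⟩; omega)

-- B's distinct list (built from the sorted copy) is A's distinct list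
theorem vals_eq (results : List Int) :
    PySem.List.sorted (PySem.Set.ofList (PySem.List.sorted (results.filter (fun r => decide (r ≠ -1))) (fun x => x) true)) (fun x => x) true
      = PySem.List.sorted (PySem.Set.ofList (results.filter (fun r => decide (r ≠ -1)))) (fun x => x) true := by
  apply PySem.List.sorted_rev_eq_of_perm_of_pairwise_gt
  · refine ((PySem.List.sorted_perm ..).trans ?_)
    rw [List.perm_ext_iff_of_nodup (PySem.Set.nodup_ofList _) (PySem.Set.nodup_ofList _)]
    intro a
    rw [PySem.Set.mem_ofList, PySem.Set.mem_ofList, PySem.List.mem_sorted]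
  · exact vals_pairwise results

-- ===== VERDICT (by name: the statement is the Claim_ definition above) =====
theorem generate_placings_spec : Claim_equal_generate_placings := by
  intro results counter _
  unfold Spec_generate_placings
  have hmem : ∀ v ∈ PySem.List.sorted (PySem.Set.ofList (results.filter (fun r => decide (r ≠ -1)))) (fun x => x) true, v ∈ results ∧ v ≠ -1 := by
    intro v hv
    rw [PySem.List.mem_sorted, PySem.Set.mem_ofList, List.mem_filter] at hv
    exact ⟨hv.1, by simpa using hv.2⟩
  have hdc : ∀ r ∈ results, r ≠ -1 → r ∉ PySem.List.sorted (PySem.Set.ofList (results.filter (fun r => decide (r ≠ -1)))) (fun x => x) true → ∀ w ∈ PySem.List.sorted (PySem.Set.ofList (results.filter (fun r => decide (r ≠ -1)))) (fun x => x) true, w < r := by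
    intro r hr h1 h2
    exfalso
    apply h2
    rw [PySem.List.mem_sorted, PySem.Set.mem_ofList, List.mem_filter]
    exact ⟨hr, by simpa using h1⟩
  have hc : counter = counter + (results.countP (fun r => decide (r ≠ -1) && !((PySem.List.sorted (PySem.Set.ofList (results.filter (fun r => decide (r ≠ -1)))) (fun x => x) true).contains r)) : Int) := by
    have hz : results.countP (fun r => decide (r ≠ -1) && !((PySem.List.sorted (PySem.Set.ofList (results.filter (fun r => decide (r ≠ -1)))) (fun x => x) true).contains r)) = 0 := by
      rw [List.countP_eq_zero]
      intro r hr
      simp only [Bool.and_eq_true, Bool.not_eq_true', decide_eq_true_eq, not_and]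
      intro h1
      simp
      exact ⟨hr, h1⟩
    rw [hz]; omega
  simp only [generate_placings, generate_placings_alt]
  rw [vals_eq results]
  exact congrArg PySem.Dict.items
    (fold_eq results counter _ (vals_pairwise results) hmem hdc PySem.Dict.empty counter hc)
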